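-- pv_equiv track=rewrite | github.com/young55775/Genetorch-developing | CELE_genome.py | centri
-- ===== SOURCE A (Python) =====
-- def centri(count9):
--     res = {}
--     for j in ['A', 'T', 'C', 'G']:
--         c = {'-4': {}, '-3': {}, '-2': {}, '-1': {}, '0': {}, '1': {}, '2': {}, '3': {}, '4': {}}
--         for i in count9.keys():
--             if i[4] == j:
--                 if i[0]:
--                     if i[0] not in c['-4'].keys():
--                         c['-4'][i[0]] = count9[i]
--                     else:
--                         c['-4'][i[0]] += count9[i]
--                 if i[1]:
--                     if i[1] not in c['-3'].keys():
--                         c['-3'][i[1]] = count9[i]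
--                     else:
--                         c['-3'][i[1]] += count9[i]
--                 if i[2]:
--                     if i[2] not in c['-2'].keys():
--                         c['-2'][i[2]] = count9[i]
--                     else:
--                         c['-2'][i[2]] += count9[i]
--                 if i[3]:
--                     if i[3] not in c['-1'].keys():
--                         c['-1'][i[3]] = count9[i]
--                     else:
--                         c['-1'][i[3]] += count9[i]
--                 if i[4]:
--                     if i[4] not in c['0'].keys():
--                         c['0'][i[4]] = count9[i]
--                     else:
--                         c['0'][i[4]] += count9[i]
--                 if i[5]:
--                     if i[5] not in c['1'].keys():
--                         c['1'][i[5]] = count9[i]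
--                     else:
--                         c['1'][i[5]] += count9[i]
--                 if i[6]:
--                     if i[6] not in c['2'].keys():
--                         c['2'][i[6]] = count9[i]
--                     else:
--                         c['2'][i[6]] += count9[i]
--                 if i[7]:
--                     if i[7] not in c['3'].keys():
--                         c['3'][i[7]] = count9[i]
--                     else:
--                         c['3'][i[7]] += count9[i]
--                 if i[8]:
--                     if i[8] not in c['4'].keys():
--                         c['4'][i[8]] = count9[i]
--                     else:
--                         c['4'][i[8]] += count9[i]
--         res[j] = c
--     return res
-- ===== SOURCE B (Python) =====
-- def centri(count9):
--     labels = ['-4', '-3', '-2', '-1', '0', '1', '2', '3', '4']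
--     res = {j: {l: {} for l in labels} for j in 'ATCG'}
--     for i, v in count9.items():
--         g = res.get(i[4])
--         if g is not None:
--             for p, l in enumerate(labels):
--                 ch = i[p]
--                 if ch:
--                     g[l][ch] = g[l].get(ch, 0) + v
--     return res
-- ===== Notes on version B (the rewrite author's own statement) =====
-- stated objective: simpler
-- what changed: Replaces A's four filtered scans of the dict (one per nucleotide) and its nine copy-pasted per-position if-blocks by one pre-built skeleton of the four groups and a single pass over count9.items() that dispatches each key to its center's group and loops over the nine positions with get-based accumulation.
import Mathlib
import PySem

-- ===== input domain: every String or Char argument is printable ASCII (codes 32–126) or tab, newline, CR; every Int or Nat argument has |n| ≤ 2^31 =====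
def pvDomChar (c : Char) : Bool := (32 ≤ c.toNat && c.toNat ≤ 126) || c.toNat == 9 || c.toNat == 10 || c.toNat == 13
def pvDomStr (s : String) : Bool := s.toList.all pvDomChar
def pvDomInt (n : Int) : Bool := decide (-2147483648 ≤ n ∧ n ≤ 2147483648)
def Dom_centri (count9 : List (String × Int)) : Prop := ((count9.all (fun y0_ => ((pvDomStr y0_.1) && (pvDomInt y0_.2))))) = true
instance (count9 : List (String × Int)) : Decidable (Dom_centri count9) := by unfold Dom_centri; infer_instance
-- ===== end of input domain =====

-- B replaces A's four filtered scans and nine copy-pasted if-blocks by one pre-built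
-- group skeleton and a single dispatching pass looping over the nine positions (simpler).


-- ===== PORT A =====
-- A's fresh inner table c = {'-4': {}, ..., '4': {}}
def pvInit9 : PySem.Dict String (PySem.Dict String Int) :=
  PySem.Dict.ofList [("-4", PySem.Dict.empty), ("-3", PySem.Dict.empty), ("-2", PySem.Dict.empty),
    ("-1", PySem.Dict.empty), ("0", PySem.Dict.empty), ("1", PySem.Dict.empty), ("2", PySem.Dict.empty),
    ("3", PySem.Dict.empty), ("4", PySem.Dict.empty)]

-- one of A's nine blocks: "if i[p]: if i[p] not in c[lbl]: c[lbl][i[p]] = v else: c[lbl][i[p]] += v"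
-- (i[p] out of range = IndexError in Python; that input is excluded by Pre_, the port skips)
def pvBumpA (c : PySem.Dict String (PySem.Dict String Int)) (lbl : String) (i : String) (p : Int)
    (v : Int) : PySem.Dict String (PySem.Dict String Int) :=
  match PySem.List.pyGet? i.toList p with
  | none => c
  | some ch =>
    let k := String.singleton ch
    if k ≠ "" then
      c.modify lbl PySem.Dict.empty (fun inner =>
        if inner.contains k then inner.insert k (inner.getD k 0 + v)
        else inner.insert k v)
    else c

def centri (count9 : List (String × Int)) : List (String × List (String × List (String × Int))) :=
  let d := PySem.Dict.ofList count9
  ["A", "T", "C", "G"].map (fun j =>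
    let c := d.keys.foldl (fun c i =>
      match PySem.List.pyGet? i.toList 4 with
      | none => c
      | some ch4 =>
        if String.singleton ch4 = j then
          let v := d.getD i 0
          pvBumpA (pvBumpA (pvBumpA (pvBumpA (pvBumpA (pvBumpA (pvBumpA (pvBumpA (pvBumpA
            c "-4" i 0 v) "-3" i 1 v) "-2" i 2 v) "-1" i 3 v) "0" i 4 v) "1" i 5 v)
            "2" i 6 v) "3" i 7 v) "4" i 8 v
        else c) pvInit9
    (j, c.items.map (fun q => (q.1, q.2.items))))

-- ===== PORT B =====
def pvLabels : List String := ["-4", "-3", "-2", "-1", "0", "1", "2", "3", "4"]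

-- B's inner loop body: "if ch: g[l][ch] = g[l].get(ch, 0) + v"
def pvBumpB (g : PySem.Dict String (PySem.Dict String Int)) (l : String) (i : String) (p : Int)
    (v : Int) : PySem.Dict String (PySem.Dict String Int) :=
  match PySem.List.pyGet? i.toList p with
  | none => g
  | some ch =>
    let k := String.singleton ch
    if k ≠ "" then g.modify l PySem.Dict.empty (fun inner => inner.insert k (inner.getD k 0 + v))
    else g

-- B's "for p, l in enumerate(labels): ..."
def pvGroupUpd (g : PySem.Dict String (PySem.Dict String Int)) (i : String) (v : Int) :
    PySem.Dict String (PySem.Dict String Int) :=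
  (PySem.List.enumerate pvLabels).foldl (fun g pl => pvBumpB g pl.2 i pl.1 v) g

def centri_alt (count9 : List (String × Int)) : List (String × List (String × List (String × Int))) :=
  let init := PySem.Dict.ofList (["A", "T", "C", "G"].map (fun j =>
    (j, PySem.Dict.ofList (pvLabels.map (fun l => (l, (PySem.Dict.empty : PySem.Dict String Int)))))))
  let d := PySem.Dict.ofList count9
  let res := d.items.foldl (fun res iv =>
    match PySem.List.pyGet? iv.1.toList 4 with
    | none => res
    | some ch4 =>
      let j := String.singleton ch4
      match res.get? j with
      | none => res
      | some g => res.insert j (pvGroupUpd g iv.1 iv.2)) init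
  res.items.map (fun p => (p.1, p.2.items.map (fun q => (q.1, q.2.items))))

-- ===== PRECONDITION & SPEC =====
-- Pre_ excludes exactly the inputs on which A raises IndexError: a key shorter than 5
-- characters (i[4] fails), or a key centered on A/T/C/G but shorter than 9 (i[5..8] fail).
def Pre_centri (count9 : List (String × Int)) : Prop :=
  ∀ p ∈ count9, 5 ≤ p.1.length ∧
    ((p.1.toList[4]? = some 'A' ∨ p.1.toList[4]? = some 'T' ∨
      p.1.toList[4]? = some 'C' ∨ p.1.toList[4]? = some 'G') → 9 ≤ p.1.length)
instance (count9 : List (String × Int)) : Decidable (Pre_centri count9) := by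
  unfold Pre_centri; infer_instance

def pvWitness_centri : (List (String × Int)) := [("GATTACAAT", 3), ("xxTxAxCxx", 1), ("abXde", -2)]

def Spec_centri (count9 : List (String × Int)) (out : List (String × List (String × List (String × Int)))) : Prop := out = centri_alt count9
instance (count9 : List (String × Int)) (out : List (String × List (String × List (String × Int)))) : Decidable (Spec_centri count9 out) := by unfold Spec_centri; infer_instance

-- ===== CLAIM (what is proved, stated in full; the proofs are below) =====
def Claim_equal_centri : Prop := ∀ (count9 : List (String × Int)), Dom_centri count9 → Pre_centri count9 → Spec_centri count9 (centri count9)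

-- ===== LEMMAS AND PROOFS =====

-- A's nine-block chain on one matching key, as a named function (defeq to the chain in `centri`)
def pvBigA (c : PySem.Dict String (PySem.Dict String Int)) (i : String) (v : Int) :
    PySem.Dict String (PySem.Dict String Int) :=
  pvBumpA (pvBumpA (pvBumpA (pvBumpA (pvBumpA (pvBumpA (pvBumpA (pvBumpA (pvBumpA
    c "-4" i 0 v) "-3" i 1 v) "-2" i 2 v) "-1" i 3 v) "0" i 4 v) "1" i 5 v)
    "2" i 6 v) "3" i 7 v) "4" i 8 v

-- A's per-item step for the group of letter j, on an (key, value) item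
def pvStepA (j : String) (c : PySem.Dict String (PySem.Dict String Int)) (p : String × Int) :
    PySem.Dict String (PySem.Dict String Int) :=
  match PySem.List.pyGet? p.1.toList 4 with
  | none => c
  | some ch4 => if String.singleton ch4 = j then pvBigA c p.1 p.2 else c

-- B's per-item step (defeq to the fold body in `centri_alt`)
def pvStepB (res : PySem.Dict String (PySem.Dict String (PySem.Dict String Int)))
    (iv : String × Int) : PySem.Dict String (PySem.Dict String (PySem.Dict String Int)) :=
  match PySem.List.pyGet? iv.1.toList 4 with
  | none => res
  | some ch4 =>
    let j := String.singleton ch4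
    match res.get? j with
    | none => res
    | some g => res.insert j (pvGroupUpd g iv.1 iv.2)

lemma pv_branch_eq (inner : PySem.Dict String Int) (k : String) (v : Int) :
    (if inner.contains k then inner.insert k (inner.getD k 0 + v) else inner.insert k v)
      = inner.insert k (inner.getD k 0 + v) := by
  by_cases h : inner.contains k = true
  · simp [h]
  · simp only [Bool.not_eq_true] at h
    rw [PySem.Dict.getD_of_not_contains]
    · simp
    · exact h

lemma pv_bump_eq (g : PySem.Dict String (PySem.Dict String Int)) (l : String) (i : String)
    (p : Int) (v : Int) : pvBumpB g l i p v = pvBumpA g l i p v := by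
  unfold pvBumpA pvBumpB
  cases PySem.List.pyGet? i.toList p with
  | none => rfl
  | some ch => simp only [pv_branch_eq]

lemma pv_groupUpd_eq (g : PySem.Dict String (PySem.Dict String Int)) (i : String) (v : Int) :
    pvGroupUpd g i v = pvBigA g i v := by
  have he : PySem.List.enumerate pvLabels
      = [((0:Int),"-4"),(1,"-3"),(2,"-2"),(3,"-1"),(4,"0"),(5,"1"),(6,"2"),(7,"3"),(8,"4")] := by
    decide
  unfold pvGroupUpd pvBigA
  rw [he]
  simp only [List.foldl, pv_bump_eq]

lemma pv_sing_eq_iff (ch c : Char) : String.singleton ch = String.singleton c ↔ ch = c := by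
  simp [String.singleton, String.ext_iff]

lemma pv_beqA (ch : Char) (h : ¬ ch = 'A') : ("A" == String.singleton ch) = false := by
  simp [String.singleton, String.ext_iff, beq_eq_false_iff_ne]; intro hc; exact h hc.symm

lemma pv_beqT (ch : Char) (h : ¬ ch = 'T') : ("T" == String.singleton ch) = false := by
  simp [String.singleton, String.ext_iff, beq_eq_false_iff_ne]; intro hc; exact h hc.symm

lemma pv_beqC (ch : Char) (h : ¬ ch = 'C') : ("C" == String.singleton ch) = false := by
  simp [String.singleton, String.ext_iff, beq_eq_false_iff_ne]; intro hc; exact h hc.symm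

lemma pv_beqG (ch : Char) (h : ¬ ch = 'G') : ("G" == String.singleton ch) = false := by
  simp [String.singleton, String.ext_iff, beq_eq_false_iff_ne]; intro hc; exact h hc.symm

lemma pvStepA_matched (j : String) (c : PySem.Dict String (PySem.Dict String Int))
    (p : String × Int) (ch : Char) (h4 : PySem.List.pyGet? p.1.toList 4 = some ch)
    (hj : String.singleton ch = j) : pvStepA j c p = pvBigA c p.1 p.2 := by
  unfold pvStepA; rw [h4]; simp [hj]

lemma pvStepA_skip (j : String) (c : PySem.Dict String (PySem.Dict String Int))
    (p : String × Int) (ch : Char) (h4 : PySem.List.pyGet? p.1.toList 4 = some ch)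
    (hj : ¬ String.singleton ch = j) : pvStepA j c p = c := by
  unfold pvStepA; rw [h4]; simp [hj]

lemma pv_step_eq (gA gT gC gG : PySem.Dict String (PySem.Dict String Int)) (p : String × Int) :
    pvStepB (PySem.Dict.mk [("A",gA),("T",gT),("C",gC),("G",gG)]) p
      = PySem.Dict.mk [("A", pvStepA "A" gA p), ("T", pvStepA "T" gT p),
          ("C", pvStepA "C" gC p), ("G", pvStepA "G" gG p)] := by
  unfold pvStepB
  cases h4 : PySem.List.pyGet? p.1.toList 4 with
  | none =>
    have sA : pvStepA "A" gA p = gA := by unfold pvStepA; rw [h4]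
    have sT : pvStepA "T" gT p = gT := by unfold pvStepA; rw [h4]
    have sC : pvStepA "C" gC p = gC := by unfold pvStepA; rw [h4]
    have sG : pvStepA "G" gG p = gG := by unfold pvStepA; rw [h4]
    rw [sA, sT, sC, sG]
  | some ch =>
    by_cases hA : ch = 'A'
    · subst hA
      dsimp only
      simp only [show String.singleton 'A' = ("A" : String) from rfl]
      have hg : (PySem.Dict.mk [("A",gA),("T",gT),("C",gC),("G",gG)]).get? "A"
          = some gA := by simp [PySem.Dict.get?_mk_cons]
      rw [hg]
      dsimp only
      rw [pvStepA_matched "A" _ _ _ h4 (by decide), pvStepA_skip "T" _ _ _ h4 (by decide), pvStepA_skip "C" _ _ _ h4 (by decide), pvStepA_skip "G" _ _ _ h4 (by decide)]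
      apply PySem.Dict.ext
      rw [PySem.Dict.items_insert_of_contains]
      · simp [pv_groupUpd_eq]
      · simp
    · by_cases hT : ch = 'T'
      · subst hT
        dsimp only
        simp only [show String.singleton 'T' = ("T" : String) from rfl]
        have hg : (PySem.Dict.mk [("A",gA),("T",gT),("C",gC),("G",gG)]).get? "T"
            = some gT := by simp [PySem.Dict.get?_mk_cons]
        rw [hg]
        dsimp only
        rw [pvStepA_matched "T" _ _ _ h4 (by decide), pvStepA_skip "A" _ _ _ h4 (by decide), pvStepA_skip "C" _ _ _ h4 (by decide), pvStepA_skip "G" _ _ _ h4 (by decide)]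
        apply PySem.Dict.ext
        rw [PySem.Dict.items_insert_of_contains]
        · simp [pv_groupUpd_eq]
        · simp
      · by_cases hC : ch = 'C'
        · subst hC
          dsimp only
          simp only [show String.singleton 'C' = ("C" : String) from rfl]
          have hg : (PySem.Dict.mk [("A",gA),("T",gT),("C",gC),("G",gG)]).get? "C"
              = some gC := by simp [PySem.Dict.get?_mk_cons]
          rw [hg]
          dsimp only
          rw [pvStepA_matched "C" _ _ _ h4 (by decide), pvStepA_skip "A" _ _ _ h4 (by decide), pvStepA_skip "T" _ _ _ h4 (by decide), pvStepA_skip "G" _ _ _ h4 (by decide)]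
          apply PySem.Dict.ext
          rw [PySem.Dict.items_insert_of_contains]
          · simp [pv_groupUpd_eq]
          · simp
        · by_cases hG : ch = 'G'
          · subst hG
            dsimp only
            simp only [show String.singleton 'G' = ("G" : String) from rfl]
            have hg : (PySem.Dict.mk [("A",gA),("T",gT),("C",gC),("G",gG)]).get? "G"
                = some gG := by simp [PySem.Dict.get?_mk_cons]
            rw [hg]
            dsimp only
            rw [pvStepA_matched "G" _ _ _ h4 (by decide), pvStepA_skip "A" _ _ _ h4 (by decide), pvStepA_skip "T" _ _ _ h4 (by decide), pvStepA_skip "C" _ _ _ h4 (by decide)]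
            apply PySem.Dict.ext
            rw [PySem.Dict.items_insert_of_contains]
            · simp [pv_groupUpd_eq]
            · simp
          · have hn : (PySem.Dict.mk [("A",gA),("T",gT),("C",gC),("G",gG)]).get?
                (String.singleton ch) = none := by
              simp [pv_beqA _ hA, pv_beqT _ hT, pv_beqC _ hC,
                pv_beqG _ hG, PySem.Dict.get?]
            dsimp only
            rw [hn]
            rw [pvStepA_skip _ _ _ _ h4 (by rw [show ("A":String) = String.singleton 'A' from rfl, pv_sing_eq_iff]; exact hA),
                pvStepA_skip _ _ _ _ h4 (by rw [show ("T":String) = String.singleton 'T' from rfl, pv_sing_eq_iff]; exact hT),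
                pvStepA_skip _ _ _ _ h4 (by rw [show ("C":String) = String.singleton 'C' from rfl, pv_sing_eq_iff]; exact hC),
                pvStepA_skip _ _ _ _ h4 (by rw [show ("G":String) = String.singleton 'G' from rfl, pv_sing_eq_iff]; exact hG)]

lemma pv_main (ps : List (String × Int)) (gA gT gC gG : PySem.Dict String (PySem.Dict String Int)) :
    ps.foldl pvStepB (PySem.Dict.mk [("A",gA),("T",gT),("C",gC),("G",gG)])
      = PySem.Dict.mk [("A", ps.foldl (pvStepA "A") gA), ("T", ps.foldl (pvStepA "T") gT),
          ("C", ps.foldl (pvStepA "C") gC), ("G", ps.foldl (pvStepA "G") gG)] := by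
  induction ps generalizing gA gT gC gG with
  | nil => rfl
  | cons p ps ih => simp only [List.foldl_cons, pv_step_eq, ih]

-- the fold over d.keys with a d.getD lookup is the fold over d.items
lemma pv_keys_fold (d : PySem.Dict String Int) (h : d.keys.Nodup) (j : String) :
    d.keys.foldl (fun c i =>
      match PySem.List.pyGet? i.toList 4 with
      | none => c
      | some ch4 =>
        if String.singleton ch4 = j then
          pvBumpA (pvBumpA (pvBumpA (pvBumpA (pvBumpA (pvBumpA (pvBumpA (pvBumpA (pvBumpA
            c "-4" i 0 (d.getD i 0)) "-3" i 1 (d.getD i 0)) "-2" i 2 (d.getD i 0))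
            "-1" i 3 (d.getD i 0)) "0" i 4 (d.getD i 0)) "1" i 5 (d.getD i 0))
            "2" i 6 (d.getD i 0)) "3" i 7 (d.getD i 0)) "4" i 8 (d.getD i 0)
        else c) pvInit9
      = d.items.foldl (pvStepA j) pvInit9 := by
  have hv : ∀ x ∈ d.items, d.getD x.1 0 = x.2 := by
    intro x hx
    exact PySem.Dict.getD_of_mem_items d (by simpa using hx) h 0
  simp only [PySem.Dict.keys, List.foldl_map]
  apply PySem.List.foldl_congr_mem
  intro acc x hx
  unfold pvStepA
  cases h4 : PySem.List.pyGet? x.1.toList 4 with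
  | none => rfl
  | some ch =>
    dsimp only
    rw [hv x hx]
    rfl

-- ===== VERDICT (by name: the statement is the Claim_ definition above) =====
theorem centri_spec : Claim_equal_centri := by
  intro count9 _ _
  unfold Spec_centri centri centri_alt
  dsimp only
  simp only [List.map_cons, List.map_nil]
  rw [pv_keys_fold _ (PySem.Dict.nodup_keys_ofList count9) "A",
      pv_keys_fold _ (PySem.Dict.nodup_keys_ofList count9) "T",
      pv_keys_fold _ (PySem.Dict.nodup_keys_ofList count9) "C",
      pv_keys_fold _ (PySem.Dict.nodup_keys_ofList count9) "G"]
  have hInit : PySem.Dict.ofList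
      [("A", PySem.Dict.ofList (List.map (fun l => (l, (PySem.Dict.empty : PySem.Dict String Int))) pvLabels)),
        ("T", PySem.Dict.ofList (List.map (fun l => (l, PySem.Dict.empty)) pvLabels)),
        ("C", PySem.Dict.ofList (List.map (fun l => (l, PySem.Dict.empty)) pvLabels)),
        ("G", PySem.Dict.ofList (List.map (fun l => (l, PySem.Dict.empty)) pvLabels))]
      = PySem.Dict.mk [("A", pvInit9), ("T", pvInit9), ("C", pvInit9), ("G", pvInit9)] := by
    decide
  have hB : (fun (res : PySem.Dict String (PySem.Dict String (PySem.Dict String Int))) (iv : String × Int) =>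
      match PySem.List.pyGet? iv.1.toList 4 with
      | none => res
      | some ch4 =>
        match res.get? (String.singleton ch4) with
        | none => res
        | some g => res.insert (String.singleton ch4) (pvGroupUpd g iv.1 iv.2)) = pvStepB := rfl
  rw [hInit, hB, pv_main]
  rfl
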